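-- pv_equiv track=rewrite | github.com/froginafog/python_programs | plot_2D_3D_json_data_with_python/functions.py | convert_dictionary_of_dictionaries_to_table
-- ===== SOURCE A (Python) =====
-- def convert_dictionary_of_dictionaries_to_table(dictionary):
--     column_names = []
--     for key in dictionary.keys(): #The keys become the column names.
--         column_names.append(key)
--     table = []
--     for value_dict in dictionary.values(): #Here, value_dict is still a dictionary
--         row = []
--         for value in value_dict.values():
--             row.append(value)
--         table.append(row)
--     table = matrix_transpose(table)
--     return column_names, table
--
-- def matrix_transpose(A):
--     num_rows = len(A)
--     num_columns = len(A[0])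
--     a = []
--     for j in range(0, num_columns):
--         for i in range(0, num_rows):
--             a.append(A[i][j])
--     temp = num_rows
--     num_rows = num_columns
--     num_columns = temp
--     AT = [] #transpose of A
--     k = 0
--     for i in range(0, num_rows):
--         row = []
--         for j in range(0, num_columns):
--             row.append(a[k])
--             k = k + 1
--         AT.append(row)
--     return AT
-- ===== SOURCE B (Python) =====
-- def convert_dictionary_of_dictionaries_to_table(dictionary):
--     column_names = list(dictionary.keys())
--     table = [list(d.values()) for d in dictionary.values()]
--     num_columns = len(table[0])
--     transposed = [[table[i][j] for i in range(len(table))]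
--                   for j in range(num_columns)]
--     return column_names, transposed
-- ===== Notes on version B (the rewrite author's own statement) =====
-- stated objective: simpler
-- what changed: Replaces the helper's two-phase transpose (flatten column-major into a scratch list, then rebuild rows with a running counter) with one direct nested comprehension indexing table[i][j], and builds the column/row lists by comprehension instead of append loops.
import Mathlib
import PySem

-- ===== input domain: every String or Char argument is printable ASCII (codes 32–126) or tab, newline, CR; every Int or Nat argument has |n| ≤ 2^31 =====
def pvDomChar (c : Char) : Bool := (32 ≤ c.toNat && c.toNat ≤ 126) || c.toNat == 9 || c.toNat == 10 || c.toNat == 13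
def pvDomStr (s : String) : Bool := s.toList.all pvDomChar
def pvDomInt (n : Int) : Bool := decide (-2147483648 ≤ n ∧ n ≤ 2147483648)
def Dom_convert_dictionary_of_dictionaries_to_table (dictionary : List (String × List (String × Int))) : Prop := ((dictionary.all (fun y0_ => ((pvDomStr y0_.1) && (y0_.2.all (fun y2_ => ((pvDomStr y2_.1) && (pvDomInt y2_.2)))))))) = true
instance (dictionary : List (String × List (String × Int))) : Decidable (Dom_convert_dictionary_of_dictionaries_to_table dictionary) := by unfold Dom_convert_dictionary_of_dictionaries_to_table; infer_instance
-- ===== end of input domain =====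

-- B replaces A's two-phase transpose (flatten column-major into a scratch list, then rebuild
-- rows with a running counter) by one direct nested comprehension; simpler, same cost.

-- ===== PORT A =====
def matrix_transpose (A : List (List Int)) : List (List Int) :=
  let num_rows : Int := (A.length : Int)
  let num_columns : Int := ((PySem.List.pyGetD A 0 []).length : Int)
  let a : List Int := (PySem.List.pyRange 0 num_columns 1).foldl (fun acc j =>
    (PySem.List.pyRange 0 num_rows 1).foldl (fun acc2 i =>
      acc2 ++ [PySem.List.pyGetD (PySem.List.pyGetD A i []) j 0]) acc) []
  -- num_rows, num_columns swapped via temp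
  let num_rows2 : Int := num_columns
  let num_columns2 : Int := num_rows
  let st := (PySem.List.pyRange 0 num_rows2 1).foldl (fun (st : List (List Int) × Int) _i =>
      let inner := (PySem.List.pyRange 0 num_columns2 1).foldl
        (fun (rk : List Int × Int) _j => (rk.1 ++ [PySem.List.pyGetD a rk.2 0], rk.2 + 1))
        (([] : List Int), st.2)
      (st.1 ++ [inner.1], inner.2)) (([] : List (List Int)), (0 : Int))
  st.1

def convert_dictionary_of_dictionaries_to_table (dictionary : List (String × List (String × Int))) : List String × List (List Int) :=
  let d := PySem.Dict.ofList dictionary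
  let column_names := d.keys.foldl (fun acc k => acc ++ [k]) []
  let table := d.values.foldl (fun acc vd =>
      acc ++ [(PySem.Dict.ofList vd).values.foldl (fun r v => r ++ [v]) []]) []
  (column_names, matrix_transpose table)

-- ===== PORT B =====
def convert_dictionary_of_dictionaries_to_table_alt (dictionary : List (String × List (String × Int))) : List String × List (List Int) :=
  let d := PySem.Dict.ofList dictionary
  let column_names := d.keys
  let table := d.values.map (fun vd => (PySem.Dict.ofList vd).values)
  let num_columns : Int := ((PySem.List.pyGetD table 0 []).length : Int)
  let transposed := (PySem.List.pyRange 0 num_columns 1).map (fun j =>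
    (PySem.List.pyRange 0 (table.length : Int) 1).map (fun i =>
      PySem.List.pyGetD (PySem.List.pyGetD table i []) j 0))
  (column_names, transposed)

-- ===== PRECONDITION & SPEC =====
-- Pre_ excludes exactly the inputs where Python A raises IndexError: the empty dict
-- (len(table[0]) fails) and dicts where some inner dict has fewer values than the first one
-- (A[i][j] fails); B raises identically there.
def Pre_convert_dictionary_of_dictionaries_to_table (dictionary : List (String × List (String × Int))) : Prop :=
  let lens := (PySem.Dict.ofList dictionary).values.map
    (fun vd => (PySem.Dict.ofList vd).values.length)
  lens ≠ [] ∧ ∀ m ∈ lens, lens.headD 0 ≤ m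
instance (dictionary : List (String × List (String × Int))) : Decidable (Pre_convert_dictionary_of_dictionaries_to_table dictionary) := by unfold Pre_convert_dictionary_of_dictionaries_to_table; infer_instance

def pvWitness_convert_dictionary_of_dictionaries_to_table : (List (String × List (String × Int))) :=
  [("x", [("a", 1), ("b", 2)]), ("y", [("a", 3), ("b", 4)])]

def Spec_convert_dictionary_of_dictionaries_to_table (dictionary : List (String × List (String × Int))) (out : List String × List (List Int)) : Prop := out = convert_dictionary_of_dictionaries_to_table_alt dictionary
instance (dictionary : List (String × List (String × Int))) (out : List String × List (List Int)) : Decidable (Spec_convert_dictionary_of_dictionaries_to_table dictionary out) := by unfold Spec_convert_dictionary_of_dictionaries_to_table; infer_instance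

-- ===== CLAIM =====
def Claim_equal_convert_dictionary_of_dictionaries_to_table : Prop := ∀ (dictionary : List (String × List (String × Int))), Dom_convert_dictionary_of_dictionaries_to_table dictionary → Pre_convert_dictionary_of_dictionaries_to_table dictionary → Spec_convert_dictionary_of_dictionaries_to_table dictionary (convert_dictionary_of_dictionaries_to_table dictionary)


-- ===== LEMMAS AND PROOFS =====

-- Length of a flatMap of equal-length chunks.
theorem pv_len (f : ℕ → List Int) (n m : ℕ) (hlen : ∀ j, (f j).length = n) :
    ((List.range m).flatMap f).length = m * n := by
  rw [List.length_flatMap]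
  simp [hlen, List.map_const', mul_comm]

-- Phase-2 inner loop: appends a[k], a[k+1], … to the row, counter advances by the range length.
theorem pv_inner2 (a : List Int) (l : List Int) (r : List Int) (k : Int) :
    l.foldl (fun (rk : List Int × Int) _j => (rk.1 ++ [PySem.List.pyGetD a rk.2 0], rk.2 + 1)) (r, k)
    = (r ++ (List.range l.length).map (fun (t : ℕ) => PySem.List.pyGetD a (k + (t : Int)) 0),
       k + (l.length : Int)) := by
  induction l generalizing r k with
  | nil => simp
  | cons x xs ih =>
    simp only [List.foldl_cons]
    rw [ih, Prod.mk.injEq]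
    simp only [List.length_cons]
    refine ⟨?_, by push_cast; ring⟩
    rw [List.range_succ_eq_map, List.map_cons, List.map_map, List.append_assoc,
      List.singleton_append]
    congr 1
    congr 1
    · simp
    · apply List.map_congr_left
      intro t _
      simp only [Function.comp_apply]
      congr 1
      push_cast
      ring

-- Phase-2 outer loop: emits consecutive blocks of the scratch list as rows.
theorem pv_outer2 (a : List Int) (n : ℕ) (l : List Int) (AT : List (List Int)) (k : Int) :
    l.foldl (fun (st : List (List Int) × Int) _i =>
        let inner := (PySem.List.pyRange 0 (n : Int) 1).foldl
          (fun (rk : List Int × Int) _j => (rk.1 ++ [PySem.List.pyGetD a rk.2 0], rk.2 + 1))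
          (([] : List Int), st.2)
        (st.1 ++ [inner.1], inner.2)) (AT, k)
    = (AT ++ (List.range l.length).map (fun (s : ℕ) =>
          (List.range n).map (fun (t : ℕ) =>
            PySem.List.pyGetD a (k + (s : Int) * (n : Int) + (t : Int)) 0)),
       k + (l.length : Int) * (n : Int)) := by
  induction l generalizing AT k with
  | nil => simp
  | cons x xs ih =>
    simp only [List.foldl_cons]
    rw [pv_inner2]
    simp only [PySem.List.length_pyRange_one, sub_zero, Int.toNat_natCast, List.nil_append]
    rw [ih, Prod.mk.injEq]
    simp only [List.length_cons]
    refine ⟨?_, by push_cast; ring⟩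
    rw [List.range_succ_eq_map, List.map_cons, List.map_map, List.append_assoc,
      List.singleton_append]
    congr 1
    congr 1
    · apply List.map_congr_left
      intro t _
      congr 1
      push_cast
      ring
    · apply List.map_congr_left
      intro s _
      simp only [Function.comp_apply]
      apply List.map_congr_left
      intro t _
      congr 1
      push_cast
      ring

-- Phase-1: the scratch list is a column-major flatMap.
theorem pv_phase1 (T : List (List Int)) (m n : ℕ) :
    (PySem.List.pyRange 0 (m : Int) 1).foldl (fun acc j =>
      (PySem.List.pyRange 0 (n : Int) 1).foldl (fun acc2 i =>
        acc2 ++ [PySem.List.pyGetD (PySem.List.pyGetD T i []) j 0]) acc) []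
    = (List.range m).flatMap (fun (j : ℕ) =>
        (List.range n).map (fun (i : ℕ) =>
          PySem.List.pyGetD (PySem.List.pyGetD T (i : Int) []) (j : Int) 0)) := by
  have h1 : ∀ (j : Int) (acc : List Int),
      (PySem.List.pyRange 0 (n : Int) 1).foldl (fun acc2 i =>
        acc2 ++ [PySem.List.pyGetD (PySem.List.pyGetD T i []) j 0]) acc
      = acc ++ (List.range n).map (fun (i : ℕ) =>
          PySem.List.pyGetD (PySem.List.pyGetD T (i : Int) []) j 0) := by
    intro j acc
    rw [PySem.List.foldl_append_singleton_eq_map, PySem.List.pyRange_zero_natCast, List.map_map]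
    simp
  calc (PySem.List.pyRange 0 (m : Int) 1).foldl (fun acc j =>
      (PySem.List.pyRange 0 (n : Int) 1).foldl (fun acc2 i =>
        acc2 ++ [PySem.List.pyGetD (PySem.List.pyGetD T i []) j 0]) acc) []
      = (PySem.List.pyRange 0 (m : Int) 1).foldl (fun acc j =>
          acc ++ (List.range n).map (fun (i : ℕ) =>
            PySem.List.pyGetD (PySem.List.pyGetD T (i : Int) []) j 0)) [] := by
        apply PySem.List.foldl_congr_mem
        intro acc j _
        exact h1 j acc
    _ = _ := by
        rw [PySem.List.foldl_append_eq_flatMap, PySem.List.pyRange_zero_natCast,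
          List.flatMap_map]
        simp

-- Indexing the flatMap of equal-length chunks recovers chunk s, element t.
theorem pv_chunk (f : ℕ → List Int) (n m s t : ℕ) (hs : s < m) (ht : t < n)
    (hlen : ∀ j, (f j).length = n) :
    PySem.List.pyGetD ((List.range m).flatMap f) ((s * n + t : ℕ) : Int) 0
    = PySem.List.pyGetD (f s) ((t : ℕ) : Int) 0 := by
  simp only [PySem.List.pyGetD_natCast]
  induction m with
  | zero => omega
  | succ m ih =>
    rw [List.range_succ, List.flatMap_append, List.flatMap_singleton]
    by_cases h : s < m
    · have hlt : s * n + t < m * n := by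
        calc s * n + t < s * n + n := by omega
        _ = (s + 1) * n := by ring
        _ ≤ m * n := Nat.mul_le_mul_right n h
      rw [List.getD_eq_getElem?_getD,
        List.getElem?_append_left (by rw [pv_len f n m hlen]; omega),
        ← List.getD_eq_getElem?_getD]
      exact ih h
    · have hsm : s = m := by omega
      subst hsm
      rw [List.getD_eq_getElem?_getD,
        List.getElem?_append_right (by rw [pv_len f n s hlen]; omega),
        pv_len f n s hlen]
      have hidx : s * n + t - s * n = t := by omega
      rw [hidx, ← List.getD_eq_getElem?_getD]

-- The whole transpose: A's two-phase helper equals B's direct double map, for ANY table.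
theorem pv_transpose_eq (T : List (List Int)) :
    matrix_transpose T
    = (PySem.List.pyRange 0 ((PySem.List.pyGetD T 0 []).length : Int) 1).map (fun j =>
        (PySem.List.pyRange 0 (T.length : Int) 1).map (fun i =>
          PySem.List.pyGetD (PySem.List.pyGetD T i []) j 0)) := by
  unfold matrix_transpose
  dsimp only
  rw [pv_phase1 T (PySem.List.pyGetD T 0 []).length T.length,
    pv_outer2 _ T.length _ _ _]
  simp only [PySem.List.length_pyRange_one, sub_zero, Int.toNat_natCast, List.nil_append]
  rw [PySem.List.pyRange_zero_natCast, PySem.List.pyRange_zero_natCast, List.map_map]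
  apply List.map_congr_left
  intro s hs
  simp only [Function.comp_apply, List.map_map]
  apply List.map_congr_left
  intro t ht
  simp only [Function.comp_apply]
  rw [List.mem_range] at hs ht
  have hidx : (0 : Int) + (s : Int) * (T.length : Int) + (t : Int)
      = ((s * T.length + t : ℕ) : Int) := by push_cast; ring
  rw [hidx, pv_chunk _ T.length _ s t hs ht (by simp)]
  simp only [PySem.List.pyGetD_natCast, List.getD_eq_getElem?_getD, List.getElem?_map,
    List.getElem?_range ht, Option.map_some, Option.getD_some]

-- ===== VERDICT =====
theorem convert_dictionary_of_dictionaries_to_table_spec : Claim_equal_convert_dictionary_of_dictionaries_to_table := by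
  intro dictionary _ _
  unfold Spec_convert_dictionary_of_dictionaries_to_table
  unfold convert_dictionary_of_dictionaries_to_table convert_dictionary_of_dictionaries_to_table_alt
  simp only [PySem.List.foldl_append_singleton_eq_self, PySem.List.foldl_append_singleton_eq_map,
    List.nil_append]
  rw [pv_transpose_eq]
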